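-- pv_equiv track=rewrite | github.com/Shonitbar/IOT_SMART_HOME | room_config.py | get_room_from_topic
-- ===== SOURCE A (Python) =====
-- ROOMS = {
--     "Living Room": {
--         "room_id": 1,
--         "sensors": {
--             "temperature": "pr/home/room1/temperature",
--             "humidity": "pr/home/room1/humidity",
--             "light": "pr/home/room1/light"
--         }
--     },
--     "Bedroom": {
--         "room_id": 2,
--         "sensors": {
--             "temperature": "pr/home/room2/temperature",
--             "humidity": "pr/home/room2/humidity",
--             "light": "pr/home/room2/light"
--         }
--     },
--     "Kitchen": {
--         "room_id": 3,
--         "sensors": {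
--             "temperature": "pr/home/room3/temperature",
--             "humidity": "pr/home/room3/humidity",
--             "light": "pr/home/room3/light"
--         }
--     },
--     "Bathroom": {
--         "room_id": 4,
--         "sensors": {
--             "temperature": "pr/home/room4/temperature",
--             "humidity": "pr/home/room4/humidity",
--             "light": "pr/home/room4/light"
--         }
--     },
--     "Office": {
--         "room_id": 5,
--         "sensors": {
--             "temperature": "pr/home/room5/temperature",
--             "humidity": "pr/home/room5/humidity",
--             "light": "pr/home/room5/light"
--         }
--     },
--     "Garage": {
--         "room_id": 6,
--         "sensors": {
--             "temperature": "pr/home/room6/temperature",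
--             "humidity": "pr/home/room6/humidity",
--             "light": "pr/home/room6/light"
--         }
--     }
-- }
--
-- CUSTOM_TOPIC_MAP = {
--     # Map your actual sensor topics here
--     "pr/home/5976397/sts": ("Living Room", "humidity"),
--     "pr/home/room1/humidity": ("Living Room", "humidity"),
--     "pr/home/room2/humidity": ("Bedroom", "humidity"),
--     # Add more custom mappings below:
--     # "pr/home/relay_123_YY/temperature": ("Kitchen", "temperature"),
-- }
--
-- def get_room_from_topic(topic):
--     # First check custom topic map
--     if topic in CUSTOM_TOPIC_MAP:
--         return CUSTOM_TOPIC_MAP[topic][0]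
--
--     # Then check standard format
--     for room_name, room_data in ROOMS.items():
--         for sensor_name, sensor_topic in room_data["sensors"].items():
--             if sensor_topic == topic:
--                 return room_name
--     return None
-- ===== SOURCE B (Python) =====
-- # B does not need the ROOMS table at all: the standard topics are exactly
-- # 'pr/home/room<N>/<sensor>' with N = 1..6, so the room is decoded from the topic.
-- CUSTOM_TOPIC_MAP = {
--     "pr/home/5976397/sts": ("Living Room", "humidity"),
--     "pr/home/room1/humidity": ("Living Room", "humidity"),
--     "pr/home/room2/humidity": ("Bedroom", "humidity"),
-- }
--
-- # The standard topics are exactly "pr/home/room<N>/<sensor>" with N = room_id 1..6,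
-- # so instead of scanning ROOMS we decode the room number from the topic string.
-- ROOM_NAMES = ("Living Room", "Bedroom", "Kitchen", "Bathroom", "Office", "Garage")
-- SENSOR_KINDS = ("temperature", "humidity", "light")
-- STD_PREFIX = "pr/home/room"
--
-- def get_room_from_topic(topic):
--     hit = CUSTOM_TOPIC_MAP.get(topic)
--     if hit is not None:
--         return hit[0]
--     if topic.startswith(STD_PREFIX):
--         rest = topic[len(STD_PREFIX):]
--         if len(rest) >= 2 and "1" <= rest[0] <= "6" and rest[1] == "/" and rest[2:] in SENSOR_KINDS:
--             return ROOM_NAMES[ord(rest[0]) - ord("1")]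
--     return None
-- ===== Notes on version B (the rewrite author's own statement) =====
-- stated objective: alternative
-- what changed: Instead of scanning the nested ROOMS table, B decodes the room straight from the topic string: after the custom-map check it tests the standard prefix, reads the single room digit (1-6) and the sensor kind, and indexes a flat tuple of room names by that digit.
import Mathlib
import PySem

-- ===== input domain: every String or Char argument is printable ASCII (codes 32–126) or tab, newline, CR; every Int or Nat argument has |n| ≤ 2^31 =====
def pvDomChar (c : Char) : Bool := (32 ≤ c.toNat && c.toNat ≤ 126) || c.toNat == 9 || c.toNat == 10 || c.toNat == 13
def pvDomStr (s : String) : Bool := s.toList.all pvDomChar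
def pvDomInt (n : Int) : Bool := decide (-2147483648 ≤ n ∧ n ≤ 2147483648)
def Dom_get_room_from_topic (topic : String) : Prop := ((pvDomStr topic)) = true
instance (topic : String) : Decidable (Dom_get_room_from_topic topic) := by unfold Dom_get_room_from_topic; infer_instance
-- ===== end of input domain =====

-- B replaces A's nested scan of the ROOMS table by decoding the room number straight from the
-- topic string ("pr/home/room<N>/<sensor>") and indexing a flat name tuple (objective: alternative).

-- ===== PORT A =====
-- ROOMS: room name -> (room_id, sensors dict)
def pvRooms : PySem.Dict String (Int × PySem.Dict String String) :=
  PySem.Dict.mk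
    [ ("Living Room", (1, PySem.Dict.mk [("temperature", "pr/home/room1/temperature"), ("humidity", "pr/home/room1/humidity"), ("light", "pr/home/room1/light")]))
    , ("Bedroom",     (2, PySem.Dict.mk [("temperature", "pr/home/room2/temperature"), ("humidity", "pr/home/room2/humidity"), ("light", "pr/home/room2/light")]))
    , ("Kitchen",     (3, PySem.Dict.mk [("temperature", "pr/home/room3/temperature"), ("humidity", "pr/home/room3/humidity"), ("light", "pr/home/room3/light")]))
    , ("Bathroom",    (4, PySem.Dict.mk [("temperature", "pr/home/room4/temperature"), ("humidity", "pr/home/room4/humidity"), ("light", "pr/home/room4/light")]))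
    , ("Office",      (5, PySem.Dict.mk [("temperature", "pr/home/room5/temperature"), ("humidity", "pr/home/room5/humidity"), ("light", "pr/home/room5/light")]))
    , ("Garage",      (6, PySem.Dict.mk [("temperature", "pr/home/room6/temperature"), ("humidity", "pr/home/room6/humidity"), ("light", "pr/home/room6/light")])) ]

def pvCustomTopicMap : PySem.Dict String (String × String) :=
  PySem.Dict.mk
    [ ("pr/home/5976397/sts", ("Living Room", "humidity"))
    , ("pr/home/room1/humidity", ("Living Room", "humidity"))
    , ("pr/home/room2/humidity", ("Bedroom", "humidity")) ]

-- inner loop: for sensor_name, sensor_topic in room_data["sensors"].items(): if sensor_topic == topic: return room_name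
def pvSensorScan (topic : String) : List (String × String) → Bool
  | [] => false
  | (_, sensorTopic) :: rest => if sensorTopic == topic then true else pvSensorScan topic rest

-- outer loop: for room_name, room_data in ROOMS.items()
def pvRoomScan (topic : String) : List (String × (Int × PySem.Dict String String)) → Option String
  | [] => none
  | (roomName, roomData) :: rest =>
      if pvSensorScan topic roomData.2.items then some roomName else pvRoomScan topic rest

def get_room_from_topic (topic : String) : Option String :=
  match pvCustomTopicMap.get? topic with
  | some v => some v.1
  | none => pvRoomScan topic pvRooms.items

-- ===== PORT B =====
def pvRoomNames : List String := ["Living Room", "Bedroom", "Kitchen", "Bathroom", "Office", "Garage"]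
def pvSensorKinds : List String := ["temperature", "humidity", "light"]

-- if topic.startswith("pr/home/room"): rest = topic[12:]; len(rest)>=2 (pattern d::s::tail),
-- "1" <= rest[0] <= "6", rest[1] == "/", rest[2:] in SENSOR_KINDS -> ROOM_NAMES[ord(rest[0]) - ord("1")]
def pvStdDecode (topic : String) : Option String :=
  if PySem.Str.startswith topic "pr/home/room" then
    match PySem.List.slice topic.toList (some 12) none with   -- rest = topic[len(STD_PREFIX):]
    | d :: s :: tail =>                                       -- len(rest) >= 2, rest[0] = d, rest[1] = s
        if '1' ≤ d && d ≤ '6' && s == '/' && pvSensorKinds.contains (String.ofList tail) then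
          -- ROOM_NAMES[ord(rest[0]) - ord("1")]; the index is in range 0..5 under the guard, so pyGet? is some _
          PySem.List.pyGet? pvRoomNames ((d.toNat : Int) - 49)
        else none
    | _ => none
  else none

def get_room_from_topic_alt (topic : String) : Option String :=
  match pvCustomTopicMap.get? topic with     -- hit = CUSTOM_TOPIC_MAP.get(topic)
  | some hit => some hit.1
  | none => pvStdDecode topic

-- ===== PRECONDITION & SPEC =====
def Spec_get_room_from_topic (topic : String) (out : Option String) : Prop := out = get_room_from_topic_alt topic
instance (topic : String) (out : Option String) : Decidable (Spec_get_room_from_topic topic out) := by unfold Spec_get_room_from_topic; infer_instance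

-- ===== CLAIM =====
def Claim_equal_get_room_from_topic : Prop := ∀ (topic : String), Dom_get_room_from_topic topic → Spec_get_room_from_topic topic (get_room_from_topic topic)

-- ===== LEMMAS AND PROOFS =====
theorem char_cases (d : Char) (h1 : '1' ≤ d) (h2 : d ≤ '6') :
    d = '1' ∨ d = '2' ∨ d = '3' ∨ d = '4' ∨ d = '5' ∨ d = '6' := by
  rw [Char.le_def] at h1 h2
  replace h1 := UInt32.le_iff_toNat_le.mp h1
  replace h2 := UInt32.le_iff_toNat_le.mp h2
  have h3 : '1'.val.toNat = 49 := by decide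
  have h4 : '6'.val.toNat = 54 := by decide
  have : d.val.toNat = 49 ∨ d.val.toNat = 50 ∨ d.val.toNat = 51 ∨ d.val.toNat = 52 ∨ d.val.toNat = 53 ∨ d.val.toNat = 54 := by omega
  rcases this with h|h|h|h|h|h <;>
    [left; (right;left); (right;right;left); (right;right;right;left); (right;right;right;right;left); (right;right;right;right;right)] <;>
    · apply Char.ext; apply UInt32.toNat_inj.mp; rw [h]; decide
set_option maxHeartbeats 2000000 in
theorem scan_none (topic : String)
    (h : PySem.Str.startswith topic "pr/home/room" = false) :
    pvRoomScan topic pvRooms.items = none := by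
  have n0 : ("pr/home/room1/temperature" == topic) = false := by
    rw [beq_eq_false_iff_ne]; intro e; subst e; exact absurd h (by decide)
  have n1 : ("pr/home/room1/humidity" == topic) = false := by
    rw [beq_eq_false_iff_ne]; intro e; subst e; exact absurd h (by decide)
  have n2 : ("pr/home/room1/light" == topic) = false := by
    rw [beq_eq_false_iff_ne]; intro e; subst e; exact absurd h (by decide)
  have n3 : ("pr/home/room2/temperature" == topic) = false := by
    rw [beq_eq_false_iff_ne]; intro e; subst e; exact absurd h (by decide)
  have n4 : ("pr/home/room2/humidity" == topic) = false := by
    rw [beq_eq_false_iff_ne]; intro e; subst e; exact absurd h (by decide)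
  have n5 : ("pr/home/room2/light" == topic) = false := by
    rw [beq_eq_false_iff_ne]; intro e; subst e; exact absurd h (by decide)
  have n6 : ("pr/home/room3/temperature" == topic) = false := by
    rw [beq_eq_false_iff_ne]; intro e; subst e; exact absurd h (by decide)
  have n7 : ("pr/home/room3/humidity" == topic) = false := by
    rw [beq_eq_false_iff_ne]; intro e; subst e; exact absurd h (by decide)
  have n8 : ("pr/home/room3/light" == topic) = false := by
    rw [beq_eq_false_iff_ne]; intro e; subst e; exact absurd h (by decide)
  have n9 : ("pr/home/room4/temperature" == topic) = false := by
    rw [beq_eq_false_iff_ne]; intro e; subst e; exact absurd h (by decide)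
  have n10 : ("pr/home/room4/humidity" == topic) = false := by
    rw [beq_eq_false_iff_ne]; intro e; subst e; exact absurd h (by decide)
  have n11 : ("pr/home/room4/light" == topic) = false := by
    rw [beq_eq_false_iff_ne]; intro e; subst e; exact absurd h (by decide)
  have n12 : ("pr/home/room5/temperature" == topic) = false := by
    rw [beq_eq_false_iff_ne]; intro e; subst e; exact absurd h (by decide)
  have n13 : ("pr/home/room5/humidity" == topic) = false := by
    rw [beq_eq_false_iff_ne]; intro e; subst e; exact absurd h (by decide)
  have n14 : ("pr/home/room5/light" == topic) = false := by
    rw [beq_eq_false_iff_ne]; intro e; subst e; exact absurd h (by decide)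
  have n15 : ("pr/home/room6/temperature" == topic) = false := by
    rw [beq_eq_false_iff_ne]; intro e; subst e; exact absurd h (by decide)
  have n16 : ("pr/home/room6/humidity" == topic) = false := by
    rw [beq_eq_false_iff_ne]; intro e; subst e; exact absurd h (by decide)
  have n17 : ("pr/home/room6/light" == topic) = false := by
    rw [beq_eq_false_iff_ne]; intro e; subst e; exact absurd h (by decide)
  simp [pvRoomScan, pvSensorScan, pvRooms, n0, n1, n2, n3, n4, n5, n6, n7, n8, n9, n10, n11, n12, n13, n14, n15, n16, n17]
set_option maxHeartbeats 4000000 in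
theorem scan_eq_decode (topic : String) : pvRoomScan topic pvRooms.items = pvStdDecode topic := by
  by_cases hpre : PySem.Str.startswith topic "pr/home/room" = true
  · have hp : "pr/home/room".toList <+: topic.toList := by
      rw [PySem.Str.startswith_eq] at hpre
      exact (PySem.Chars.startswith_iff _ _).mp hpre
    obtain ⟨rest, hrest⟩ := hp
    have htop : topic = String.ofList ("pr/home/room".toList ++ rest) := by
      rw [String.ext_iff]; simp [← hrest]
    subst htop
    have hsl : PySem.List.slice (String.ofList ("pr/home/room".toList ++ rest)).toList (some 12) none = rest := by
      rw [String.toList_ofList]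
      rw [show ((12:Int)) = (((12:Nat)):Int) from rfl, PySem.List.slice_from_natCast]
      rw [show (12:Nat) = "pr/home/room".toList.length from (by decide), List.drop_left]
    unfold pvStdDecode
    simp only [hpre, if_true, hsl]
    rcases rest with _ | ⟨d, _ | ⟨s, tail⟩⟩
    · -- rest = []: no standard topic has this form, both sides are none
      simp [pvRoomScan, pvSensorScan, pvRooms]
    · -- rest = [d]
      simp [pvRoomScan, pvSensorScan, pvRooms]
      split_ifs with h1 h2 h3 h4 h5 h6
      · rcases h1 with e|e|e <;> (have e2 := congrArg String.toList e; simp at e2)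
      · rcases h2 with e|e|e <;> (have e2 := congrArg String.toList e; simp at e2)
      · rcases h3 with e|e|e <;> (have e2 := congrArg String.toList e; simp at e2)
      · rcases h4 with e|e|e <;> (have e2 := congrArg String.toList e; simp at e2)
      · rcases h5 with e|e|e <;> (have e2 := congrArg String.toList e; simp at e2)
      · rcases h6 with e|e|e <;> (have e2 := congrArg String.toList e; simp at e2)
      · rfl
    · by_cases hg : ('1' ≤ d && d ≤ '6' && s == '/' && pvSensorKinds.contains (String.ofList tail)) = true
      · simp only [hg, if_true]
        have hg2 := hg
        simp only [Bool.and_eq_true, beq_iff_eq, decide_eq_true_eq] at hg2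
        obtain ⟨⟨⟨hd1, hd2⟩, hs⟩, hmem⟩ := hg2
        subst hs
        have hmem2 : String.ofList tail = "temperature" ∨ String.ofList tail = "humidity" ∨ String.ofList tail = "light" := by
          simpa [pvSensorKinds] using hmem
        have htail : tail = "temperature".toList ∨ tail = "humidity".toList ∨ tail = "light".toList := by
          rcases hmem2 with e|e|e <;> [left; (right;left); (right;right)] <;>
            (have e2 := congrArg String.toList e; simpa using e2)
        rcases char_cases d hd1 hd2 with hd|hd|hd|hd|hd|hd <;> subst hd <;>
          rcases htail with ht|ht|ht <;> subst ht <;> decide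
      · simp only [hg, Bool.false_eq_true, if_false]
        simp [pvRoomScan, pvSensorScan, pvRooms]
        split_ifs with h1 h2 h3 h4 h5 h6
        · rcases h1 with e|e|e <;> (have e2 := congrArg String.toList e; simp at e2; obtain ⟨hd, hs, ht⟩ := e2; subst hd; subst hs; subst ht; exact hg (by decide))
        · rcases h2 with e|e|e <;> (have e2 := congrArg String.toList e; simp at e2; obtain ⟨hd, hs, ht⟩ := e2; subst hd; subst hs; subst ht; exact hg (by decide))
        · rcases h3 with e|e|e <;> (have e2 := congrArg String.toList e; simp at e2; obtain ⟨hd, hs, ht⟩ := e2; subst hd; subst hs; subst ht; exact hg (by decide))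
        · rcases h4 with e|e|e <;> (have e2 := congrArg String.toList e; simp at e2; obtain ⟨hd, hs, ht⟩ := e2; subst hd; subst hs; subst ht; exact hg (by decide))
        · rcases h5 with e|e|e <;> (have e2 := congrArg String.toList e; simp at e2; obtain ⟨hd, hs, ht⟩ := e2; subst hd; subst hs; subst ht; exact hg (by decide))
        · rcases h6 with e|e|e <;> (have e2 := congrArg String.toList e; simp at e2; obtain ⟨hd, hs, ht⟩ := e2; subst hd; subst hs; subst ht; exact hg (by decide))
        · rfl
  · rw [Bool.not_eq_true] at hpre
    rw [scan_none topic hpre]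
    rw [PySem.Str.startswith_eq] at hpre
    simp at hpre
    unfold pvStdDecode
    rw [if_neg (by simp [hpre])]

-- ===== VERDICT =====
theorem get_room_from_topic_spec : Claim_equal_get_room_from_topic := by
  intro topic _
  unfold Spec_get_room_from_topic get_room_from_topic get_room_from_topic_alt
  cases h : pvCustomTopicMap.get? topic with
  | some v => rfl
  | none => exact scan_eq_decode topic
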